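-- pv_equiv track=rewrite | github.com/plo8/cpsc449-project2 | wordle.py | getGuessState
-- ===== SOURCE A (Python) =====
-- def getGuessState(guess, secret):
--     word = guess
--     secretWord = secret
--
--     matched = []
--     valid = []
--
--     for i in range(len(secretWord)):
--         correct = word[i] == secretWord[i]
--         valid.append({"inSecret": correct, "wrongSpot": False, "used": True if correct else False})
--         matched.append(correct)
--
--     for i in range(len(secretWord)):
--         currentLetter = secretWord[i]
--         for j in range(len(secretWord)):
--             if i != j:
--                 if not(matched[i]) and not(valid[j].get("used")):
--                     if word[j] == currentLetter:
--                         valid[j].update({"inSecret": True, "wrongSpot": True, "used": True})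
--                         matched[i] = True
--
--     data = []
--     index = 0
--
--     for i in word:
--         d = {}
--         del valid[index]["used"]
--         d[i] = valid[index]
--         data.append(d)
--         index += 1
--
--     return data
-- ===== SOURCE B (Python) =====
-- def getGuessState(guess, secret):
--     # one pass: count unmatched secret letters, then assign yellows left-to-right
--     counts = {}
--     for i in range(len(secret)):
--         if guess[i] != secret[i]:
--             c = secret[i]
--             counts[c] = counts.get(c, 0) + 1
--     data = []
--     for j in range(len(guess)):
--         ch = guess[j]
--         if ch == secret[j]:
--             state = {"inSecret": True, "wrongSpot": False}
--         elif counts.get(ch, 0) > 0: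
--             counts[ch] = counts[ch] - 1
--             state = {"inSecret": True, "wrongSpot": True}
--         else:
--             state = {"inSecret": False, "wrongSpot": False}
--         data.append({ch: state})
--     return data
-- ===== Notes on version B (the rewrite author's own statement) =====
-- stated objective: faster
-- what changed: A marks yellows with a quadratic nested scan of secret positions against guess positions over mutable matched/used flag lists; B builds a counter of unmatched secret letters once and assigns greens/yellows/grays in a single left-to-right pass over the guess, decrementing the counter.
import Mathlib
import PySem

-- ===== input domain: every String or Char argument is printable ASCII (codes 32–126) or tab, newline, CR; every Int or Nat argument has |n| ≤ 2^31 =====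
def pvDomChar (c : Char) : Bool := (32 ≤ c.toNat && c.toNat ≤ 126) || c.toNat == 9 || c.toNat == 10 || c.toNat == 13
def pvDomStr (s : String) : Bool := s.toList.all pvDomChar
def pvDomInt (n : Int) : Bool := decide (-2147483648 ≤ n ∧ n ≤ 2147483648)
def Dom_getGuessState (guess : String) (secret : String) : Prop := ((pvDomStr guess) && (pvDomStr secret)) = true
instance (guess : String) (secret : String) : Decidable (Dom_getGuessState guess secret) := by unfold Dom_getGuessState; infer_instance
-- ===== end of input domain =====

-- B replaces A's quadratic nested secret-vs-guess scan by a counter of unmatched secret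
-- letters and one left-to-right pass over the guess (objective: faster).


-- ===== PORT A =====
def getGuessState (guess : String) (secret : String) : List (List (String × List (String × Bool))) :=
  let word := guess.toList
  let secretWord := secret.toList
  -- first loop: valid/matched built by appends
  let st1 : List (PySem.Dict String Bool) × List Bool :=
    (PySem.List.pyRange 0 (PySem.Str.len secret) 1).foldl
      (fun st i =>
        let correct := PySem.List.pyGetD word i ' ' == PySem.List.pyGetD secretWord i ' '
        (st.1 ++ [((PySem.Dict.empty.insert "inSecret" correct).insert "wrongSpot" false).insert "used" correct],
         st.2 ++ [correct]))
      ([], [])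
  -- second loop: nested scan marking yellows
  let st2 : List (PySem.Dict String Bool) × List Bool :=
    (PySem.List.pyRange 0 (PySem.Str.len secret) 1).foldl
      (fun st i =>
        let currentLetter := PySem.List.pyGetD secretWord i ' '
        (PySem.List.pyRange 0 (PySem.Str.len secret) 1).foldl
          (fun (st : List (PySem.Dict String Bool) × List Bool) j =>
            if i ≠ j then
              if !(PySem.List.pyGetD st.2 i false) && !((PySem.List.pyGetD st.1 j PySem.Dict.empty).getD "used" false) then
                if PySem.List.pyGetD word j ' ' == currentLetter then
                  (PySem.List.pySetD st.1 j
                     ((((PySem.List.pyGetD st.1 j PySem.Dict.empty).insert "inSecret" true).insert "wrongSpot" true).insert "used" true),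
                   PySem.List.pySetD st.2 i true)
                else st
              else st
            else st)
          st)
      st1
  -- third loop: del valid[index]["used"]; d[i] = valid[index]
  let st3 : List (List (String × List (String × Bool))) × Int × List (PySem.Dict String Bool) :=
    word.foldl
      (fun st c =>
        let valid' := PySem.List.pySetD st.2.2 st.2.1 ((PySem.List.pyGetD st.2.2 st.2.1 PySem.Dict.empty).erase "used")
        (st.1 ++ [[(String.ofList [c], (PySem.List.pyGetD valid' st.2.1 PySem.Dict.empty).items)]],
         (st.2.1 + 1, valid')))
      ([], (0, st2.1))
  st3.1

-- ===== PORT B =====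
def getGuessState_alt (guess : String) (secret : String) : List (List (String × List (String × Bool))) :=
  let w := guess.toList
  let s := secret.toList
  -- count unmatched secret letters
  let counts : PySem.Dict String Int :=
    (PySem.List.pyRange 0 (PySem.Str.len secret) 1).foldl
      (fun d i =>
        if !(PySem.List.pyGetD w i ' ' == PySem.List.pyGetD s i ' ') then
          let c := String.ofList [PySem.List.pyGetD s i ' ']
          d.insert c (d.getD c 0 + 1)
        else d)
      PySem.Dict.empty
  -- one pass over the guess
  ((PySem.List.pyRange 0 (PySem.Str.len guess) 1).foldl
    (fun (st : PySem.Dict String Int × List (List (String × List (String × Bool)))) j =>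
      let ch := PySem.List.pyGetD w j ' '
      let key := String.ofList [ch]
      if ch == PySem.List.pyGetD s j ' ' then
        (st.1, st.2 ++ [[(key, [("inSecret", true), ("wrongSpot", false)])]])
      else if st.1.getD key 0 > 0 then
        (st.1.insert key (st.1.getD key 0 - 1), st.2 ++ [[(key, [("inSecret", true), ("wrongSpot", true)])]])
      else
        (st.1, st.2 ++ [[(key, [("inSecret", false), ("wrongSpot", false)])]]))
    (counts, [])).2

-- ===== PRECONDITION & SPEC =====
-- Pre_ excludes exactly the inputs where the Python A raises IndexError: guesses whose
-- length differs from the secret's (A indexes the other string at each position).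
def Pre_getGuessState (guess : String) (secret : String) : Prop :=
  guess.toList.length = secret.toList.length
instance (guess : String) (secret : String) : Decidable (Pre_getGuessState guess secret) := by
  unfold Pre_getGuessState; infer_instance

def pvWitness_getGuessState : String × String := ("aabb", "abab")

def Spec_getGuessState (guess : String) (secret : String) (out : List (List (String × List (String × Bool)))) : Prop := out = getGuessState_alt guess secret
instance (guess : String) (secret : String) (out : List (List (String × List (String × Bool)))) : Decidable (Spec_getGuessState guess secret out) := by unfold Spec_getGuessState; infer_instance

-- ===== CLAIM (what is proved, stated in full; the proofs are below) =====
def Claim_equal_getGuessState : Prop := ∀ (guess : String) (secret : String), Dom_getGuessState guess secret → Pre_getGuessState guess secret → Spec_getGuessState guess secret (getGuessState guess secret)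

-- ===== LEMMAS AND PROOFS =====

-- green at position k
def pvGre (w s : List Char) (k : Nat) : Bool := w.getD k ' ' == s.getD k ' '
-- non-green guess position holding letter c
def pvP (w s : List Char) (c : Char) (k : Nat) : Bool := !pvGre w s k && (w.getD k ' ' == c)
-- non-green secret position holding letter c
def pvQ (w s : List Char) (c : Char) (i : Nat) : Bool := !pvGre w s i && (s.getD i ' ' == c)
def pvCntW (w s : List Char) (j : Nat) (c : Char) : Nat := (List.range j).countP (pvP w s c)
def pvCntS (w s : List Char) (i : Nat) (c : Char) : Nat := (List.range i).countP (pvQ w s c)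
def pvRnk (w s : List Char) (k : Nat) : Nat := pvCntW w s k (w.getD k ' ')

-- the dict A keeps per guess position: green/used flags determine all three fields
def pvEncD (g u : Bool) : PySem.Dict String Bool :=
  ((PySem.Dict.empty.insert "inSecret" (g || u)).insert "wrongSpot" (!g && u)).insert "used" u

-- the row both programs emit for position k
def pvRow (w s : List Char) (k : Nat) : List (String × List (String × Bool)) :=
  [(String.ofList [w.getD k ' '],
    if pvGre w s k then [("inSecret", true), ("wrongSpot", false)]
    else if pvRnk w s k < pvCntS w s s.length (w.getD k ' ') then [("inSecret", true), ("wrongSpot", true)]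
    else [("inSecret", false), ("wrongSpot", false)])]

lemma pvKeyInj (a b : Char) : (String.ofList [a] = String.ofList [b]) ↔ a = b := by
  constructor
  · intro h; have := congrArg String.toList h; simpa using this
  · intro h; rw [h]

-- counting helpers
lemma pvRangeSplit (j N : Nat) (h : j ≤ N) :
    List.range N = List.range j ++ List.range' j (N - j) := by
  rw [List.range_eq_range', List.range_eq_range']
  have h2 := @List.range'_append 0 j (N - j) 1
  simp only [Nat.zero_add, Nat.one_mul] at h2
  rw [h2]; congr 1; omega

lemma pvCntW_lt (w s : List Char) (c : Char) (k n : Nat) (hk : k < n)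
    (hp : pvP w s c k = true) : pvCntW w s k c < pvCntW w s n c := by
  unfold pvCntW
  rw [pvRangeSplit k n (le_of_lt hk), List.countP_append]
  rw [show n - k = (n - k - 1) + 1 from by omega, List.range'_succ, List.countP_cons]
  simp [hp]

lemma pvCntW_succ (w s : List Char) (c : Char) (a : Nat) :
    pvCntW w s (a + 1) c = pvCntW w s a c + (if pvP w s c a = true then 1 else 0) := by
  unfold pvCntW
  rw [List.range_succ, List.countP_append]
  simp [List.countP_cons]

lemma pvCntS_succ (w s : List Char) (c : Char) (a : Nat) :
    pvCntS w s (a + 1) c = pvCntS w s a c + (if pvQ w s c a = true then 1 else 0) := by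
  unfold pvCntS
  rw [List.range_succ, List.countP_append]
  simp [List.countP_cons]

-- the (sorted) list of non-green guess positions holding letter c
def pvPos (w s : List Char) (n : Nat) (c : Char) : List Nat :=
  (List.range n).filter (pvP w s c)

lemma pvPos_pairwise (w s : List Char) (n : Nat) (c : Char) :
    (pvPos w s n c).Pairwise (· < ·) :=
  List.pairwise_lt_range.filter _

lemma pvPos_mem (w s : List Char) (n : Nat) (c : Char) (k : Nat) :
    k ∈ pvPos w s n c ↔ k < n ∧ pvP w s c k = true := by
  simp [pvPos, List.mem_filter]

lemma pvPos_length (w s : List Char) (n : Nat) (c : Char) :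
    (pvPos w s n c).length = pvCntW w s n c := by
  simp [pvPos, pvCntW, List.countP_eq_length_filter]

-- the m-th non-green c-position has exactly m earlier non-green c-positions
lemma pvIdxCount {p : Nat → Bool} {N m : Nat} (hm : m < ((List.range N).filter p).length) :
    (List.range (((List.range N).filter p)[m])).countP p = m := by
  set l := (List.range N).filter p with hl
  have hmem : l[m] ∈ l := List.getElem_mem hm
  have hpj : p l[m] = true := List.of_mem_filter hmem
  have hjN : l[m] < N := List.mem_range.mp (List.mem_of_mem_filter hmem)
  obtain ⟨t, ht⟩ : ∃ t, N - l[m] = t + 1 := ⟨N - l[m] - 1, by omega⟩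
  have hcons : List.range' l[m] (N - l[m]) = l[m] :: List.range' (l[m] + 1) t := by
    rw [ht, List.range'_succ]
  have hfil : l = (List.range l[m]).filter p ++
      l[m] :: (List.range' (l[m] + 1) t).filter p := by
    conv_lhs => rw [hl, pvRangeSplit l[m] N (le_of_lt hjN)]
    rw [List.filter_append, hcons, List.filter_cons_of_pos hpj]
  have hlen : ((List.range l[m]).filter p).length < l.length := by
    conv_rhs => rw [hfil]
    simp
  have hget : l[((List.range l[m]).filter p).length]'hlen = l[m] := by
    rw [List.getElem_of_eq hfil hlen, List.getElem_append_right (le_refl _)]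
    simp
  have hnd : l.Nodup := (List.pairwise_lt_range.filter p).nodup
  have := (hnd.getElem_inj_iff).mp hget
  rw [List.countP_eq_length_filter]
  exact this

lemma pvRnk_pos (w s : List Char) (n : Nat) (c : Char) (m : Nat)
    (hm : m < (pvPos w s n c).length) : pvRnk w s ((pvPos w s n c)[m]) = m := by
  have hmem : (pvPos w s n c)[m] ∈ pvPos w s n c := List.getElem_mem hm
  have hp : pvP w s c ((pvPos w s n c)[m]) = true := ((pvPos_mem w s n c _).mp hmem).2
  have hc : w.getD ((pvPos w s n c)[m]) ' ' = c := by
    have := (Bool.and_eq_true _ _).mp hp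
    exact beq_iff_eq.mp this.2
  unfold pvRnk pvCntW
  rw [hc]
  exact pvIdxCount hm

lemma pvRnk_lt_cntW (w s : List Char) (n k : Nat) (hk : k < n)
    (hg : pvGre w s k = false) : pvRnk w s k < pvCntW w s n (w.getD k ' ') := by
  unfold pvRnk
  exact pvCntW_lt w s _ k n hk (by simp [pvP, hg])

lemma pvRnk_mem_eq (w s : List Char) (n : Nat) (c : Char) (k : Nat)
    (hmem : k ∈ pvPos w s n c) : ∃ m : Nat, ∃ hm : m < (pvPos w s n c).length,
      (pvPos w s n c)[m] = k ∧ pvRnk w s k = m := by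
  obtain ⟨m, hm, hk⟩ := List.getElem_of_mem hmem
  exact ⟨m, hm, hk, by rw [← hk]; exact pvRnk_pos w s n c m hm⟩

-- generic helpers
lemma pvGetDSet (u : List Bool) (j k : Nat) (hj : j < u.length) :
    (u.set j true).getD k false = if k = j then true else u.getD k false := by
  by_cases h : k = j
  · subst h; simp [List.getD_eq_getElem?_getD, List.getElem?_set_self hj]
  · simp [List.getD_eq_getElem?_getD, List.getElem?_set_ne (Ne.symm h), h]

lemma pvSetMapRange {α : Type} (f : Nat → α) (n j : Nat) (v : α) :
    ((List.range n).map f).set j v = (List.range n).map (fun k => if k = j then v else f k) := by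
  apply List.ext_getElem (by simp)
  intro k h1 h2
  simp only [List.getElem_set, List.getElem_map, List.getElem_range]
  rcases eq_or_ne j k with h | h
  · simp [h]
  · simp [h, Ne.symm h]

lemma pvFindCongr {p q : Nat → Bool} : ∀ l : List Nat, (∀ x ∈ l, p x = q x) →
    l.find? p = l.find? q := by
  intro l
  induction l with
  | nil => simp
  | cons a l ih =>
    intro h
    have ha := h a (List.mem_cons_self)
    cases hpa : p a with
    | true => rw [List.find?_cons_of_pos hpa, List.find?_cons_of_pos (ha ▸ hpa)]
    | false =>
      rw [List.find?_cons_of_neg (by simp [hpa]), List.find?_cons_of_neg (by simp [← ha, hpa]),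
        ih (fun x hx => h x (List.mem_cons_of_mem _ hx))]

lemma pvFindRangeSome {q : Nat → Bool} {n j : Nat} (hj : j < n) (hqj : q j = true)
    (hfirst : ∀ j' < j, q j' = false) : (List.range n).find? q = some j := by
  rw [pvRangeSplit j n (le_of_lt hj), List.find?_append]
  have h1 : (List.range j).find? q = none := by
    rw [List.find?_eq_none]
    intro x hx
    simp [hfirst x (List.mem_range.mp hx)]
  rw [h1, show n - j = (n - j - 1) + 1 from by omega, List.range'_succ,
    List.find?_cons_of_pos hqj]
  rfl

-- the three-field dict A keeps per guess position, determined by (green, used)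
lemma pvEncD_self (b : Bool) :
    ((PySem.Dict.empty.insert "inSecret" b).insert "wrongSpot" false).insert "used" b
      = pvEncD b b := by cases b <;> rfl

lemma pvEncD_used (g u : Bool) : (pvEncD g u).getD "used" false = u := by
  cases g <;> cases u <;> rfl

lemma pvEncD_upd :
    (((pvEncD false false).insert "inSecret" true).insert "wrongSpot" true).insert "used" true
      = pvEncD false true := by rfl

lemma pvEncD_erase (g u : Bool) :
    ((pvEncD g u).erase "used").items = [("inSecret", g || u), ("wrongSpot", !g && u)] := by
  cases g <;> cases u <;> rfl

-- A's first loop builds the dict list and the matched list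
lemma pvPhase1 (w s : List Char) : ∀ (l : List Nat) (x : List (PySem.Dict String Bool)) (y : List Bool),
    l.foldl
      (fun x y =>
        (x.1 ++ [((PySem.Dict.empty.insert "inSecret" (w.getD y ' ' == s.getD y ' ')).insert
              "wrongSpot" false).insert "used" (w.getD y ' ' == s.getD y ' ')],
          x.2 ++ [w.getD y ' ' == s.getD y ' ']))
      (x, y)
    = (x ++ l.map (fun k => pvEncD (pvGre w s k) (pvGre w s k)), y ++ l.map (pvGre w s)) := by
  intro l
  induction l with
  | nil => simp
  | cons a l ih =>
    intro x y
    rw [List.foldl_cons, ih]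
    rw [pvEncD_self]
    have : (w.getD a ' ' == s.getD a ' ') = pvGre w s a := rfl
    rw [this]
    simp

-- A's inner loop body (one candidate guess position j for secret position i)
def pvInnerF (w s : List Char) (i : Nat) (x : List (PySem.Dict String Bool) × List Bool)
    (j : Nat) : List (PySem.Dict String Bool) × List Bool :=
  if ¬(i = j) then
    if (!x.2.getD i false && !(x.1.getD j PySem.Dict.empty).getD "used" false) = true then
      if (w.getD j ' ' == s.getD i ' ') = true then
        (x.1.set j ((((x.1.getD j PySem.Dict.empty).insert "inSecret" true).insert
            "wrongSpot" true).insert "used" true),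
          x.2.set i true)
      else x
    else x
  else x

lemma pvInnerSkip (w s : List Char) (i : Nat) : ∀ (l : List Nat)
    (st : List (PySem.Dict String Bool) × List Bool), st.2.getD i false = true →
    l.foldl (pvInnerF w s i) st = st := by
  intro l
  induction l with
  | nil => intro st _; rfl
  | cons j l ih =>
    intro st hm
    rw [List.foldl_cons]
    have hstep : pvInnerF w s i st j = st := by
      unfold pvInnerF
      rw [hm]
      simp
    rw [hstep]
    exact ih st hm

-- A's inner loop marks the first unused non-green guess position holding s[i]
lemma pvInnerScan (w s : List Char) (n i : Nat) (hi : i < n) (hgi : pvGre w s i = false) :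
    ∀ (l : List Nat), (∀ j ∈ l, j < n) → ∀ (u : List Bool), u.length = n →
    (∀ k, k < n → pvGre w s k = true → u.getD k false = true) →
    ∀ (matched : List Bool), matched.length = n → matched.getD i false = false →
    l.foldl (pvInnerF w s i)
        ((List.range n).map (fun k => pvEncD (pvGre w s k) (u.getD k false)), matched)
    = match l.find? (fun j => !(u.getD j false) && (w.getD j ' ' == s.getD i ' ')) with
      | none => ((List.range n).map (fun k => pvEncD (pvGre w s k) (u.getD k false)), matched)
      | some j => ((List.range n).map (fun k => pvEncD (pvGre w s k) ((u.set j true).getD k false)),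
          matched.set i true) := by
  intro l
  induction l with
  | nil => intro _ u hu hg matched hml hmi; simp
  | cons j l ih =>
    intro hl u hu hg matched hml hmi
    have hjn : j < n := hl j List.mem_cons_self
    rw [List.foldl_cons]
    by_cases hij : i = j
    · have hpred : (!(u.getD j false) && (w.getD j ' ' == s.getD i ' ')) = false := by
        rw [← hij]
        unfold pvGre at hgi
        rw [hgi]
        simp
      have hstep : pvInnerF w s i
          ((List.range n).map (fun k => pvEncD (pvGre w s k) (u.getD k false)), matched) j
          = ((List.range n).map (fun k => pvEncD (pvGre w s k) (u.getD k false)), matched) := by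
        unfold pvInnerF
        rw [if_neg (by simp [hij])]
      rw [hstep, List.find?_cons_of_neg (by rw [hpred]; simp),
        ih (fun x hx => hl x (List.mem_cons_of_mem _ hx)) u hu hg matched hml hmi]
    · have hv : ((List.range n).map (fun k => pvEncD (pvGre w s k) (u.getD k false))).getD j
          PySem.Dict.empty = pvEncD (pvGre w s j) (u.getD j false) :=
        PySem.List.getD_map_range _ _ _ _ hjn
      cases huj : u.getD j false with
      | true =>
        have hstep : pvInnerF w s i
            ((List.range n).map (fun k => pvEncD (pvGre w s k) (u.getD k false)), matched) j
            = ((List.range n).map (fun k => pvEncD (pvGre w s k) (u.getD k false)), matched) := by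
          unfold pvInnerF
          rw [if_pos hij]
          dsimp only
          rw [hmi, hv, pvEncD_used, huj]
          simp
        rw [hstep, List.find?_cons_of_neg (by rw [huj]; simp),
          ih (fun x hx => hl x (List.mem_cons_of_mem _ hx)) u hu hg matched hml hmi]
      | false =>
        cases hc : (w.getD j ' ' == s.getD i ' ') with
        | false =>
          have hstep : pvInnerF w s i
              ((List.range n).map (fun k => pvEncD (pvGre w s k) (u.getD k false)), matched) j
              = ((List.range n).map (fun k => pvEncD (pvGre w s k) (u.getD k false)), matched) := by
            unfold pvInnerF
            rw [if_pos hij]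
            dsimp only
            rw [hmi, hv, pvEncD_used, huj, hc]
            simp
          rw [hstep, List.find?_cons_of_neg (by rw [huj, hc]; simp),
            ih (fun x hx => hl x (List.mem_cons_of_mem _ hx)) u hu hg matched hml hmi]
        | true =>
          have hgrej : pvGre w s j = false := by
            cases hgj : pvGre w s j with
            | true => rw [hg j hjn hgj] at huj; exact absurd huj (by simp)
            | false => rfl
          have hstep : pvInnerF w s i
              ((List.range n).map (fun k => pvEncD (pvGre w s k) (u.getD k false)), matched) j
              = ((List.range n).map (fun k => pvEncD (pvGre w s k) ((u.set j true).getD k false)),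
                matched.set i true) := by
            unfold pvInnerF
            rw [if_pos hij]
            dsimp only
            rw [hmi, hv, pvEncD_used, huj, hc]
            rw [if_pos (by simp), if_pos rfl]
            rw [hgrej, pvEncD_upd, pvSetMapRange]
            refine congrArg (fun z => (z, matched.set i true)) ?_
            apply List.map_congr_left
            intro k hk
            rw [pvGetDSet u j k (hu ▸ hjn)]
            by_cases hkj : k = j
            · rw [if_pos hkj, if_pos hkj, hkj, hgrej]
            · rw [if_neg hkj, if_neg hkj]
          rw [hstep, List.find?_cons_of_pos (by rw [huj, hc]; simp)]
          exact pvInnerSkip w s i l _ (by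
            rw [pvGetDSet matched i i (hml ▸ hi), if_pos rfl])

-- the abstract step of A's outer loop on the used-flags list
def pvStepU (w s : List Char) (n : Nat) (u : List Bool) (i : Nat) : List Bool :=
  if pvGre w s i = true then u
  else
    match (List.range n).find? (fun j => !(u.getD j false) && (w.getD j ' ' == s.getD i ' ')) with
    | some j => u.set j true
    | none => u

-- A's second loop is the fold of pvStepU over the used-flags list
lemma pvOuterFold (w s : List Char) (n : Nat) : ∀ (d a : Nat), a + d = n →
    ∀ (u matched : List Bool), u.length = n → matched.length = n →
    (∀ k, a ≤ k → k < n → matched.getD k false = pvGre w s k) →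
    (∀ k, k < n → pvGre w s k = true → u.getD k false = true) →
    ∃ m' : List Bool,
    (List.range' a d).foldl (fun x y => (List.range n).foldl (pvInnerF w s y) x)
        ((List.range n).map (fun k => pvEncD (pvGre w s k) (u.getD k false)), matched)
    = ((List.range n).map (fun k =>
          pvEncD (pvGre w s k) (((List.range' a d).foldl (pvStepU w s n) u).getD k false)), m') := by
  intro d
  induction d with
  | zero => intro a _ u matched _ _ _ _; exact ⟨matched, rfl⟩
  | succ d ih =>
    intro a ha u matched hu hml hminv hg
    rw [List.range'_succ, List.foldl_cons, List.foldl_cons]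
    have han : a < n := by omega
    by_cases hga : pvGre w s a = true
    · have hmt : matched.getD a false = true := by rw [hminv a le_rfl han, hga]
      rw [pvInnerSkip w s a _ _ hmt]
      have hstep : pvStepU w s n u a = u := by unfold pvStepU; rw [if_pos hga]
      rw [hstep]
      exact ih (a+1) (by omega) u matched hu hml (fun k hk1 hk2 => hminv k (by omega) hk2) hg
    · have hgaf : pvGre w s a = false := by
        cases hx : pvGre w s a
        · rfl
        · exact absurd hx hga
      have hmf : matched.getD a false = false := by rw [hminv a le_rfl han, hgaf]
      rw [pvInnerScan w s n a han hgaf (List.range n) (fun j hj => List.mem_range.mp hj)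
        u hu hg matched hml hmf]
      have hstep : pvStepU w s n u a
          = match (List.range n).find? (fun j => !(u.getD j false) && (w.getD j ' ' == s.getD a ' ')) with
            | some j => u.set j true
            | none => u := by
        unfold pvStepU; rw [if_neg (by rw [hgaf]; simp)]
      rw [hstep]
      cases hf : (List.range n).find? (fun j => !(u.getD j false) && (w.getD j ' ' == s.getD a ' ')) with
      | none =>
        exact ih (a+1) (by omega) u matched hu hml (fun k hk1 hk2 => hminv k (by omega) hk2) hg
      | some j =>
        have hjn : j < n := List.mem_range.mp (List.mem_of_find?_eq_some hf)
        refine ih (a+1) (by omega) (u.set j true) (matched.set a true)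
          (by rw [List.length_set]; exact hu) (by rw [List.length_set]; exact hml) ?_ ?_
        · intro k hk1 hk2
          rw [pvGetDSet matched a k (hml ▸ han), if_neg (by omega)]
          exact hminv k (by omega) hk2
        · intro k hk1 hk2
          rw [pvGetDSet u j k (hu ▸ hjn)]
          by_cases hkj : k = j
          · rw [if_pos hkj]
          · rw [if_neg hkj]; exact hg k hk1 hk2

-- the closed form of A's used flags after processing the first a secret positions
def pvUF (w s : List Char) (n a : Nat) (k : Nat) : Bool :=
  pvGre w s k ||
    decide (pvRnk w s k < min (pvCntS w s a (w.getD k ' ')) (pvCntW w s n (w.getD k ' ')))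

-- one outer step advances the closed form by one secret position
lemma pvStepU_model (w s : List Char) (n a : Nat) (_ha : a < n) :
    pvStepU w s n ((List.range n).map (pvUF w s n a)) a
      = (List.range n).map (pvUF w s n (a+1)) := by
  by_cases hga : pvGre w s a = true
  · unfold pvStepU
    rw [if_pos hga]
    apply List.map_congr_left
    intro k hk
    unfold pvUF
    have hq : pvQ w s (w.getD k ' ') a = false := by
      unfold pvQ; rw [hga]; rfl
    rw [pvCntS_succ, hq]
    simp
  · have hgaf : pvGre w s a = false := by
      cases hx : pvGre w s a
      · rfl
      · exact absurd hx hga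
    unfold pvStepU
    rw [if_neg (by rw [hgaf]; simp)]
    have hcongr : ∀ j ∈ List.range n,
        (!(((List.range n).map (pvUF w s n a)).getD j false) && (w.getD j ' ' == s.getD a ' '))
        = (pvP w s (s.getD a ' ') j &&
            !decide (pvRnk w s j < min (pvCntS w s a (s.getD a ' ')) (pvCntW w s n (s.getD a ' ')))) := by
      intro j hj
      rw [PySem.List.getD_map_range _ _ _ _ (List.mem_range.mp hj)]
      unfold pvUF pvP
      cases hwc : (w.getD j ' ' == s.getD a ' ') with
      | false => simp
      | true =>
        have hwc' : w.getD j ' ' = s.getD a ' ' := beq_iff_eq.mp hwc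
        rw [hwc']
        cases hgj : pvGre w s j <;> simp
    rw [pvFindCongr _ hcongr]
    by_cases hlt : min (pvCntS w s a (s.getD a ' ')) (pvCntW w s n (s.getD a ' '))
        < pvCntW w s n (s.getD a ' ')
    · -- an unused candidate exists: the min-th non-green position holding s[a]
      have hm : min (pvCntS w s a (s.getD a ' ')) (pvCntW w s n (s.getD a ' '))
          < (pvPos w s n (s.getD a ' ')).length := by rw [pvPos_length]; exact hlt
      set m := min (pvCntS w s a (s.getD a ' ')) (pvCntW w s n (s.getD a ' ')) with hmdef
      have hmem := (pvPos_mem w s n (s.getD a ' ') _).mp (List.getElem_mem hm)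
      have hfind : (List.range n).find?
          (fun j => pvP w s (s.getD a ' ') j && !decide (pvRnk w s j < m))
          = some ((pvPos w s n (s.getD a ' '))[m]) := by
        apply pvFindRangeSome hmem.1
        · rw [hmem.2, pvRnk_pos w s n _ m hm]
          simp
        · intro j' hj'
          cases hpj' : pvP w s (s.getD a ' ') j' with
          | false => simp
          | true =>
            have hj'n : j' < n := lt_trans hj' hmem.1
            obtain ⟨m', hm', hgm', hrm'⟩ := pvRnk_mem_eq w s n (s.getD a ' ') j'
              ((pvPos_mem w s n _ j').mpr ⟨hj'n, hpj'⟩)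
            have hmm : m' < m := by
              rcases Nat.lt_trichotomy m' m with h1 | h1 | h1
              · exact h1
              · exfalso
                have h2 : (pvPos w s n (s.getD a ' '))[m']? = some j' := by
                  rw [List.getElem?_eq_getElem hm', hgm']
                rw [h1, List.getElem?_eq_getElem hm] at h2
                have h3 := Option.some.inj h2
                omega
              · exfalso
                have h4 := (List.pairwise_iff_getElem.mp (pvPos_pairwise w s n (s.getD a ' ')))
                  m m' hm hm' h1
                rw [hgm'] at h4
                omega
            rw [hrm']
            simp
            omega
      rw [hfind]
      dsimp only
      rw [pvSetMapRange]
      apply List.map_congr_left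
      intro k hk
      have hkn : k < n := List.mem_range.mp hk
      have hS1 : pvCntS w s (a+1) (s.getD a ' ') = pvCntS w s a (s.getD a ' ') + 1 := by
        rw [pvCntS_succ, show pvQ w s (s.getD a ' ') a = true from by
          unfold pvQ; rw [hgaf]; simp]
        simp
      have hmS : m = pvCntS w s a (s.getD a ' ') := by omega
      by_cases hkj : k = (pvPos w s n (s.getD a ' '))[m]
      · rw [if_pos hkj, hkj]
        have hwk : w.getD ((pvPos w s n (s.getD a ' '))[m]) ' ' = s.getD a ' ' := by
          have := hmem.2
          unfold pvP at this
          exact beq_iff_eq.mp ((Bool.and_eq_true _ _).mp this).2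
        unfold pvUF
        rw [hwk, pvRnk_pos w s n _ m hm, hS1]
        have hfin : m < min (pvCntS w s a (s.getD a ' ') + 1) (pvCntW w s n (s.getD a ' ')) := by omega
        rw [decide_eq_true hfin]
        simp
      · rw [if_neg hkj]
        unfold pvUF
        by_cases hwk : w.getD k ' ' = s.getD a ' '
        · cases hgk : pvGre w s k with
          | true => simp
          | false =>
            have hkP : k ∈ pvPos w s n (s.getD a ' ') := by
              rw [pvPos_mem]
              exact ⟨hkn, by unfold pvP; rw [hgk, hwk]; simp⟩
            obtain ⟨m', hm', hgm', hrm'⟩ := pvRnk_mem_eq w s n (s.getD a ' ') k hkP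
            have hne : m' ≠ m := by
              intro hcon
              apply hkj
              have h2 : (pvPos w s n (s.getD a ' '))[m']? = some k := by
                rw [List.getElem?_eq_getElem hm', hgm']
              rw [hcon, List.getElem?_eq_getElem hm] at h2
              exact (Option.some.inj h2).symm
            rw [hwk, hrm', hS1]
            have : (m' < min (pvCntS w s a (s.getD a ' ')) (pvCntW w s n (s.getD a ' ')))
                ↔ (m' < min (pvCntS w s a (s.getD a ' ') + 1) (pvCntW w s n (s.getD a ' '))) := by
              omega
            rw [decide_eq_decide.mpr this]
        · have hq : pvQ w s (w.getD k ' ') a = false := by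
            unfold pvQ
            rw [hgaf]
            simp only [Bool.not_false, Bool.true_and]
            rw [beq_eq_false_iff_ne]
            exact fun hh => hwk hh.symm
          rw [pvCntS_succ, hq]
          simp
    · -- no unused candidate is left for this letter
      have hfind : (List.range n).find?
          (fun j => pvP w s (s.getD a ' ') j
            && !decide (pvRnk w s j < min (pvCntS w s a (s.getD a ' ')) (pvCntW w s n (s.getD a ' '))))
          = none := by
        rw [List.find?_eq_none]
        intro j hj
        cases hpj : pvP w s (s.getD a ' ') j with
        | false => simp
        | true =>
          have hjn : j < n := List.mem_range.mp hj
          have hwj : w.getD j ' ' = s.getD a ' ' := by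
            unfold pvP at hpj
            exact beq_iff_eq.mp ((Bool.and_eq_true _ _).mp hpj).2
          have := pvCntW_lt w s (s.getD a ' ') j n hjn hpj
          have hrj : pvRnk w s j < pvCntW w s n (s.getD a ' ') := by
            unfold pvRnk
            rw [hwj]
            exact this
          have hd : decide (pvRnk w s j
              < min (pvCntS w s a (s.getD a ' ')) (pvCntW w s n (s.getD a ' '))) = true :=
            decide_eq_true (by omega)
          rw [hd]
          simp
      rw [hfind]
      dsimp only
      apply List.map_congr_left
      intro k hk
      unfold pvUF
      by_cases hwk : w.getD k ' ' = s.getD a ' '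
      · have hS1 : pvCntS w s (a+1) (w.getD k ' ') = pvCntS w s a (w.getD k ' ') + 1 := by
          rw [pvCntS_succ, show pvQ w s (w.getD k ' ') a = true from by
            unfold pvQ; rw [hgaf, hwk]; simp]
          simp
        rw [hS1, hwk]
        have : (pvRnk w s k < min (pvCntS w s a (s.getD a ' ')) (pvCntW w s n (s.getD a ' ')))
            ↔ (pvRnk w s k < min (pvCntS w s a (s.getD a ' ') + 1) (pvCntW w s n (s.getD a ' '))) := by
          omega
        rw [decide_eq_decide.mpr this]
      · have hq : pvQ w s (w.getD k ' ') a = false := by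
          unfold pvQ
          rw [hgaf]
          simp only [Bool.not_false, Bool.true_and]
          rw [beq_eq_false_iff_ne]
          exact fun hh => hwk hh.symm
        rw [pvCntS_succ, hq]
        simp

lemma pvFoldU (w s : List Char) (n : Nat) : ∀ (d a : Nat), a + d = n →
    (List.range' a d).foldl (pvStepU w s n) ((List.range n).map (pvUF w s n a))
      = (List.range n).map (pvUF w s n n) := by
  intro d
  induction d with
  | zero =>
    intro a ha
    rw [show a = n from by omega]
    rfl
  | succ d ih =>
    intro a ha
    rw [List.range'_succ, List.foldl_cons, pvStepU_model w s n a (by omega)]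
    exact ih (a+1) (by omega)

-- A's third loop: delete "used" left to right and emit the rows
lemma pvPhase3 (w : List Char) (n : Nat) (hwn : w.length = n)
    (v : Nat → PySem.Dict String Bool) :
    ∀ (d a : Nat), a + d = n → ∀ (data : List (List (String × List (String × Bool)))),
    ((w.drop a).foldl
        (fun (st : List (List (String × List (String × Bool))) × Int × List (PySem.Dict String Bool)) c =>
          (st.1 ++ [[(String.ofList [c],
                (PySem.List.pyGetD
                    (PySem.List.pySetD st.2.2 st.2.1
                      ((PySem.List.pyGetD st.2.2 st.2.1 PySem.Dict.empty).erase "used"))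
                    st.2.1 PySem.Dict.empty).items)]],
            st.2.1 + 1,
            PySem.List.pySetD st.2.2 st.2.1 ((PySem.List.pyGetD st.2.2 st.2.1 PySem.Dict.empty).erase "used")))
        (data, ((a : Int), (List.range n).map (fun k => if k < a then (v k).erase "used" else v k)))).1
    = data ++ (List.range' a d).map
        (fun k => [(String.ofList [w.getD k ' '], ((v k).erase "used").items)]) := by
  intro d
  induction d with
  | zero =>
    intro a ha data
    rw [List.drop_eq_nil_of_le (by omega)]
    simp
  | succ d ih =>
    intro a ha data
    have han : a < n := by omega
    have haw : a < w.length := by omega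
    rw [List.drop_eq_getElem_cons haw, List.foldl_cons]
    have hget : PySem.List.pyGetD ((List.range n).map
        (fun k => if k < a then (v k).erase "used" else v k)) ((a : Nat) : Int) PySem.Dict.empty
        = v a := by
      rw [PySem.List.pyGetD_natCast, PySem.List.getD_map_range _ _ _ _ han, if_neg (by omega)]
    have hset : PySem.List.pySetD ((List.range n).map
        (fun k => if k < a then (v k).erase "used" else v k)) ((a : Nat) : Int) ((v a).erase "used")
        = (List.range n).map (fun k => if k < a + 1 then (v k).erase "used" else v k) := by
      rw [PySem.List.pySetD_natCast, pvSetMapRange]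
      apply List.map_congr_left
      intro k hk
      by_cases hka : k = a
      · rw [if_pos hka, if_pos (by omega), hka]
      · rw [if_neg hka]
        by_cases hka2 : k < a
        · rw [if_pos hka2, if_pos (by omega)]
        · rw [if_neg hka2, if_neg (by omega)]
    have hget2 : PySem.List.pyGetD ((List.range n).map
        (fun k => if k < a + 1 then (v k).erase "used" else v k)) ((a : Nat) : Int) PySem.Dict.empty
        = (v a).erase "used" := by
      rw [PySem.List.pyGetD_natCast, PySem.List.getD_map_range _ _ _ _ han, if_pos (by omega)]
    dsimp only
    rw [hget, hset, hget2]
    have hcast : ((a : Nat) : Int) + 1 = (((a + 1 : Nat)) : Int) := by push_cast; ring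
    rw [hcast]
    rw [ih (a+1) (by omega) (data ++ [[(String.ofList [w[a]], ((v a).erase "used").items)]])]
    rw [List.range'_succ, List.map_cons]
    have hwa : w[a] = w.getD a ' ' := (List.getD_eq_getElem w ' ' haw).symm
    rw [hwa]
    simp

-- B's counting loop: the counter holds, per letter c, the number of non-green secret
-- positions with letter c seen so far
lemma pvCountsLoop (w s : List Char) : ∀ (l : List Nat) (d : PySem.Dict String Int) (c : Char),
    (l.foldl
        (fun x y =>
          if (!(w.getD y ' ' == s.getD y ' ')) = true then
            x.insert (String.ofList [s.getD y ' ']) (x.getD (String.ofList [s.getD y ' ']) 0 + 1)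
          else x)
        d).getD (String.ofList [c]) 0
      = d.getD (String.ofList [c]) 0 + (l.countP (pvQ w s c) : Int) := by
  intro l
  induction l with
  | nil => simp
  | cons a l ih =>
    intro d c
    rw [List.foldl_cons, List.countP_cons]
    have hqdef : pvQ w s c a = (!(w.getD a ' ' == s.getD a ' ') && (s.getD a ' ' == c)) := rfl
    cases hga : (w.getD a ' ' == s.getD a ' ') with
    | true =>
      rw [hqdef, hga]
      simp only [Bool.not_true, Bool.false_and, Bool.false_eq_true, if_false]
      rw [ih]
      simp
    | false =>
      rw [hqdef, hga]
      simp only [Bool.not_false, Bool.true_and, if_true]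
      rw [ih, PySem.Dict.getD_insert]
      by_cases hc : c = s.getD a ' '
      · subst hc
        rw [if_pos rfl]
        simp only [beq_self_eq_true, if_true]
        omega
      · rw [if_neg (by rw [pvKeyInj]; exact hc)]
        have hb : (s.getD a ' ' == c) = false := by
          rw [beq_eq_false_iff_ne]; exact fun hh => hc hh.symm
        rw [hb]
        simp

-- B's main loop: the counter invariant turns each step into the pvRow table row
lemma pvAltLoop (w s : List Char) (_hw : w.length = s.length) :
    ∀ (d a : Nat), a + d = s.length →
    ∀ (dict : PySem.Dict String Int),
    (∀ c : Char, dict.getD (String.ofList [c]) 0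
        = (pvCntS w s s.length c : Int) - (min (pvCntW w s a c) (pvCntS w s s.length c) : Int)) →
    ∀ (data : List (List (String × List (String × Bool)))),
    (List.foldl
        (fun (x : PySem.Dict String Int × List (List (String × List (String × Bool)))) y =>
          if (w.getD y ' ' == s.getD y ' ') = true then
            (x.1, x.2 ++ [[(String.ofList [w.getD y ' '], [("inSecret", true), ("wrongSpot", false)])]])
          else
            if x.1.getD (String.ofList [w.getD y ' ']) 0 > 0 then
              (x.1.insert (String.ofList [w.getD y ' '])
                  (x.1.getD (String.ofList [w.getD y ' ']) 0 - 1),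
                x.2 ++ [[(String.ofList [w.getD y ' '], [("inSecret", true), ("wrongSpot", true)])]])
            else
              (x.1, x.2 ++ [[(String.ofList [w.getD y ' '], [("inSecret", false), ("wrongSpot", false)])]]))
        (dict, data) (List.range' a d)).2
      = data ++ (List.range' a d).map (pvRow w s) := by
  intro d
  induction d with
  | zero => intro a ha dict hdict data; simp
  | succ d ih =>
    intro a ha dict hdict data
    rw [List.range'_succ, List.foldl_cons, List.map_cons]
    cases hga : (w.getD a ' ' == s.getD a ' ') with
    | true =>
      rw [if_pos rfl]
      dsimp only
      have hrow : pvRow w s a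
          = [(String.ofList [w.getD a ' '], [("inSecret", true), ("wrongSpot", false)])] := by
        unfold pvRow
        rw [show pvGre w s a = true from hga]
        simp
      have hdict' : ∀ c : Char, dict.getD (String.ofList [c]) 0
          = (pvCntS w s s.length c : Int) - (min (pvCntW w s (a+1) c) (pvCntS w s s.length c) : Int) := by
        intro c
        have hp : pvP w s c a = false := by
          unfold pvP pvGre; rw [hga]; rfl
        rw [pvCntW_succ, hp]
        simpa using hdict c
      rw [ih (a+1) (by omega) dict hdict' (data ++ _), hrow]
      simp
    | false =>
      rw [if_neg (by simp)]
      dsimp only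
      have hgre : pvGre w s a = false := hga
      have hkey := hdict (w.getD a ' ')
      have hrnk : pvRnk w s a = pvCntW w s a (w.getD a ' ') := rfl
      have hpa : ∀ c : Char, pvP w s c a = (w.getD a ' ' == c) := by
        intro c; unfold pvP pvGre; rw [hga]; simp
      by_cases hy : pvCntW w s a (w.getD a ' ') < pvCntS w s s.length (w.getD a ' ')
      · have hpos : dict.getD (String.ofList [w.getD a ' ']) 0 > 0 := by rw [hkey]; omega
        rw [if_pos hpos]
        have hrow : pvRow w s a
            = [(String.ofList [w.getD a ' '], [("inSecret", true), ("wrongSpot", true)])] := by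
          unfold pvRow
          rw [hgre, hrnk, if_pos hy]
          simp
        have hdict' : ∀ c : Char,
            (dict.insert (String.ofList [w.getD a ' ']) (dict.getD (String.ofList [w.getD a ' ']) 0 - 1)).getD (String.ofList [c]) 0
            = (pvCntS w s s.length c : Int) - (min (pvCntW w s (a+1) c) (pvCntS w s s.length c) : Int) := by
          intro c
          rw [PySem.Dict.getD_insert]
          by_cases hc : c = w.getD a ' '
          · subst hc
            rw [if_pos rfl, hkey, pvCntW_succ, hpa (w.getD a ' '), beq_self_eq_true, if_pos rfl]
            omega
          · rw [if_neg (by rw [pvKeyInj]; exact hc), hdict c, pvCntW_succ, hpa c,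
              show (w.getD a ' ' == c) = false from by
                rw [beq_eq_false_iff_ne]; exact fun hh => hc hh.symm]
            simp
        rw [ih (a+1) (by omega) _ hdict' (data ++ _), hrow]
        simp
      · have hzero : ¬(dict.getD (String.ofList [w.getD a ' ']) 0 > 0) := by rw [hkey]; omega
        rw [if_neg hzero]
        have hrow : pvRow w s a
            = [(String.ofList [w.getD a ' '], [("inSecret", false), ("wrongSpot", false)])] := by
          unfold pvRow
          rw [hgre, hrnk, if_neg hy]
          simp
        have hdict' : ∀ c : Char, dict.getD (String.ofList [c]) 0
            = (pvCntS w s s.length c : Int) - (min (pvCntW w s (a+1) c) (pvCntS w s s.length c) : Int) := by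
          intro c
          rw [hdict c, pvCntW_succ, hpa c]
          by_cases hc : c = w.getD a ' '
          · subst hc
            rw [beq_self_eq_true, if_pos rfl]
            omega
          · rw [show (w.getD a ' ' == c) = false from by
                rw [beq_eq_false_iff_ne]; exact fun hh => hc hh.symm]
            simp
        rw [ih (a+1) (by omega) dict hdict' (data ++ _), hrow]
        simp

theorem getGuessState_alt_eq_rows (guess secret : String)
    (h : guess.toList.length = secret.toList.length) :
    getGuessState_alt guess secret
      = (List.range secret.toList.length).map (pvRow guess.toList secret.toList) := by
  unfold getGuessState_alt
  simp only [PySem.Str.len_eq, h, PySem.List.pyRange_zero_nat, List.foldl_map,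
    PySem.List.pyGetD_natCast]
  rw [List.range_eq_range']
  refine Eq.trans (pvAltLoop guess.toList secret.toList h secret.toList.length 0 (by omega) _ ?_ []) (by simp)
  intro c
  rw [pvCountsLoop]
  have h1 : pvCntW guess.toList secret.toList 0 c = 0 := rfl
  have h2 : List.countP (pvQ guess.toList secret.toList c) (List.range' 0 secret.toList.length)
      = pvCntS guess.toList secret.toList secret.toList.length c := by
    rw [← List.range_eq_range']; rfl
  rw [h1, h2]
  simp

theorem getGuessState_eq_rows (guess secret : String)
    (h : guess.toList.length = secret.toList.length) :
    getGuessState guess secret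
      = (List.range secret.toList.length).map (pvRow guess.toList secret.toList) := by
  unfold getGuessState
  simp only [PySem.Str.len_eq, PySem.List.pyRange_zero_nat, List.foldl_map,
    PySem.List.pyGetD_natCast, PySem.List.pySetD_natCast, ne_eq, Nat.cast_inj]
  rw [pvPhase1 guess.toList secret.toList (List.range secret.toList.length) [] []]
  simp only [List.nil_append]
  rw [show (fun (x : List (PySem.Dict String Bool) × List Bool) (y : Nat) =>
      List.foldl
        (fun (x : List (PySem.Dict String Bool) × List Bool) (y_1 : Nat) =>
          if ¬(y = y_1) then
            if (!x.2.getD y false && !(x.1.getD y_1 PySem.Dict.empty).getD "used" false) = true then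
              if (guess.toList.getD y_1 ' ' == secret.toList.getD y ' ') = true then
                (x.1.set y_1
                    ((((x.1.getD y_1 PySem.Dict.empty).insert "inSecret" true).insert
                        "wrongSpot" true).insert "used" true),
                  x.2.set y true)
              else x
            else x
          else x)
        x (List.range secret.toList.length))
      = (fun (x : List (PySem.Dict String Bool) × List Bool) (y : Nat) =>
          List.foldl (pvInnerF guess.toList secret.toList y) x (List.range secret.toList.length))
      from rfl]
  have hinit : (List.range secret.toList.length).map
      (fun k => pvEncD (pvGre guess.toList secret.toList k) (pvGre guess.toList secret.toList k))
      = (List.range secret.toList.length).map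
        (fun k => pvEncD (pvGre guess.toList secret.toList k)
          (((List.range secret.toList.length).map (pvGre guess.toList secret.toList)).getD k false)) := by
    apply List.map_congr_left
    intro k hk
    rw [PySem.List.getD_map_range _ _ _ _ (List.mem_range.mp hk)]
  rw [hinit]
  obtain ⟨m', hm'⟩ := pvOuterFold guess.toList secret.toList secret.toList.length
    secret.toList.length 0 (by omega)
    ((List.range secret.toList.length).map (pvGre guess.toList secret.toList))
    ((List.range secret.toList.length).map (pvGre guess.toList secret.toList))
    (by simp) (by simp)
    (fun k _ hk2 => PySem.List.getD_map_range _ _ _ _ hk2)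
    (fun k hk1 hk2 => by rw [PySem.List.getD_map_range _ _ _ _ hk1]; exact hk2)
  rw [← List.range_eq_range'] at hm'
  rw [hm']
  have hu0 : (List.range secret.toList.length).map (pvGre guess.toList secret.toList)
      = (List.range secret.toList.length).map (pvUF guess.toList secret.toList secret.toList.length 0) := by
    apply List.map_congr_left
    intro k hk
    unfold pvUF
    rw [show pvCntS guess.toList secret.toList 0 (guess.toList.getD k ' ') = 0 from rfl]
    simp
  have hC := pvFoldU guess.toList secret.toList secret.toList.length secret.toList.length 0 (by omega)
  rw [← List.range_eq_range'] at hC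
  rw [hu0, hC]
  dsimp only
  have hv : (List.range secret.toList.length).map
      (fun k => pvEncD (pvGre guess.toList secret.toList k)
        (((List.range secret.toList.length).map
          (pvUF guess.toList secret.toList secret.toList.length secret.toList.length)).getD k false))
      = (List.range secret.toList.length).map
        (fun k => pvEncD (pvGre guess.toList secret.toList k)
          (pvUF guess.toList secret.toList secret.toList.length secret.toList.length k)) := by
    apply List.map_congr_left
    intro k hk
    rw [PySem.List.getD_map_range _ _ _ _ (List.mem_range.mp hk)]
  rw [hv]
  have h3 := pvPhase3 guess.toList secret.toList.length h
    (fun k => pvEncD (pvGre guess.toList secret.toList k)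
      (pvUF guess.toList secret.toList secret.toList.length secret.toList.length k))
    secret.toList.length 0 (by omega) []
  rw [Nat.cast_zero, List.drop_zero, List.nil_append] at h3
  simp only [Nat.not_lt_zero, if_false] at h3
  rw [← List.range_eq_range'] at h3
  rw [h3]
  apply List.map_congr_left
  intro k hk
  have hkn : k < secret.toList.length := List.mem_range.mp hk
  rw [pvEncD_erase]
  unfold pvRow
  cases hgk : pvGre guess.toList secret.toList k with
  | true =>
    have hut : pvUF guess.toList secret.toList secret.toList.length secret.toList.length k = true := by
      unfold pvUF; rw [hgk]; simp
    rw [if_pos rfl, hut]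
    simp
  | false =>
    have hrnkT := pvRnk_lt_cntW guess.toList secret.toList secret.toList.length k hkn hgk
    rw [if_neg (by simp)]
    unfold pvUF
    rw [hgk]
    by_cases hy : pvRnk guess.toList secret.toList k
        < pvCntS guess.toList secret.toList secret.toList.length (guess.toList.getD k ' ')
    · rw [if_pos hy,
        decide_eq_true (show pvRnk guess.toList secret.toList k
          < min (pvCntS guess.toList secret.toList secret.toList.length (guess.toList.getD k ' '))
              (pvCntW guess.toList secret.toList secret.toList.length (guess.toList.getD k ' '))
          from by omega)]
      simp
    · rw [if_neg hy,
        decide_eq_false (show ¬(pvRnk guess.toList secret.toList k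
          < min (pvCntS guess.toList secret.toList secret.toList.length (guess.toList.getD k ' '))
              (pvCntW guess.toList secret.toList secret.toList.length (guess.toList.getD k ' ')))
          from by omega)]
      simp

-- ===== VERDICT (by name: the statement is the Claim_ definition above) =====
theorem getGuessState_spec : Claim_equal_getGuessState := by
  intro guess secret _hd hp
  unfold Spec_getGuessState
  rw [getGuessState_eq_rows guess secret hp, getGuessState_alt_eq_rows guess secret hp]
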